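-- pv_equiv track=rewrite | github.com/kimjune01/june.kim | worklog/h14_final.py | all_pairs_reachable_set
-- ===== SOURCE A (Python) =====
-- from collections import defaultdict
-- import heapq
--
-- def build_adj(edges):
--     adj = defaultdict(list)
--     for (a, b, t) in edges:
--         adj[a].append((b, t))
--         adj[b].append((a, t))
--     return adj
--
-- def temporal_reach_from(source, adj, depart=-1):
--     best = {source: depart}
--     queue = [(depart, source)]
--     while queue:
--         t_arr, u = heapq.heappop(queue)
--         if t_arr > best.get(u, float('inf')):
--             continue
--         for (v, te) in adj[u]:
--             if te >= t_arr and te < best.get(v, float('inf')):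
--                 best[v] = te
--                 heapq.heappush(queue, (te, v))
--     return best
--
-- def all_pairs_reachable_set(k, edges):
--     """Return set of reachable (u,v) pairs."""
--     adj = build_adj(edges)
--     n = 2 * k
--     pairs = set()
--     for s in range(n):
--         r = temporal_reach_from(s, adj)
--         for d in r:
--             if d != s:
--                 pairs.add((s, d))
--     return pairs
-- ===== SOURCE B (Python) =====
-- import bisect
--
-- def all_pairs_reachable_set(k, edges):
--     """Return set of reachable (u,v) pairs."""
--     pairs = set()
--     for s in range(2 * k):
--         best = {s: -1}
--         pending = [(-1, s)]          # kept sorted; front is always the minimum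
--         while pending:
--             t_arr, u = pending.pop(0)
--             if t_arr > best.get(u, float('inf')):
--                 continue
--             # relax by scanning the edge list directly (no prebuilt adjacency index)
--             for (a, b, te) in edges:
--                 if a == u and te >= t_arr and te < best.get(b, float('inf')):
--                     best[b] = te
--                     bisect.insort(pending, (te, b))
--                 if b == u and te >= t_arr and te < best.get(a, float('inf')):
--                     best[a] = te
--                     bisect.insort(pending, (te, a))
--         for d in best:
--             if d != s:
--                 pairs.add((s, d))
--     return pairs
-- ===== Notes on version B (the rewrite author's own statement) =====
-- stated objective: alternative
-- what changed: Replaced the prebuilt defaultdict adjacency index plus binary-heap (heapq) priority queue by direct edge-list scans for relaxation and a sorted pending list maintained with bisect.insort and popped from the front.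
import Mathlib
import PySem

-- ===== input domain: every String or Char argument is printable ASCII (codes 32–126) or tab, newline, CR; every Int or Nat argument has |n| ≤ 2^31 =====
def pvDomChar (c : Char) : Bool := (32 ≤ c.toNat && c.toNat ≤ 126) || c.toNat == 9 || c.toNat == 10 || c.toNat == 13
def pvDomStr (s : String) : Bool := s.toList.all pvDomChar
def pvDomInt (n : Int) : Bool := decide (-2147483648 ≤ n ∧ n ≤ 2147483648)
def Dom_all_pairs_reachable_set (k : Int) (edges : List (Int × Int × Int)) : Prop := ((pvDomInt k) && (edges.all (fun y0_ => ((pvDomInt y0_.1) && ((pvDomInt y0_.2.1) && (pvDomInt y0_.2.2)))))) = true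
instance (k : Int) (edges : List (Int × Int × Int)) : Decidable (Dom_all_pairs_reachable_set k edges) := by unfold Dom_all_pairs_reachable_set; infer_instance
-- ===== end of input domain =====

-- B replaces A's prebuilt defaultdict adjacency index and binary-heap priority queue by direct
-- edge-list scans and a sorted pending list (bisect.insort / pop front): an alternative of similar
-- size, not claimed faster. Return values are proved equal (A mutates nothing observable).

-- ===== PORT A =====
-- shared tiny predicates (the same Python expressions occur verbatim in A and B):
-- 't_arr > best.get(u, float("inf"))' — comparison with +inf is False when u is absent
def staleGt (t : Int) (o : Option Int) : Bool :=
  match o with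
  | some b => decide (b < t)
  | none => false

-- 'te >= t_arr and te < best.get(v, float("inf"))'
def improves (tarr te : Int) (o : Option Int) : Bool :=
  decide (tarr ≤ te) && (match o with | some b => decide (te < b) | none => true)

def build_adj (edges : List (Int × Int × Int)) : PySem.Dict Int (List (Int × Int)) :=
  edges.foldl (fun d e =>
    (PySem.Dict.modify d e.1 [] (· ++ [(e.2.1, e.2.2)])).modify e.2.1 [] (· ++ [(e.1, e.2.2)]))
    PySem.Dict.empty

-- one relaxation 'if te >= t_arr and te < best.get(v, inf): best[v] = te; heappush(queue, (te, v))';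
-- heappush adds one entry to the heap's multiset of pending entries, modelled by list append
def stepA (tarr : Int) (p : PySem.Dict Int Int × List (Int × Int)) (vt : Int × Int) :
    PySem.Dict Int Int × List (Int × Int) :=
  if improves tarr vt.2 (p.1.get? vt.1) then (p.1.insert vt.1 vt.2, p.2 ++ [(vt.2, vt.1)]) else p

-- Python tuple comparison (t, u) <= (t', u') used by heapq, as a selection function
def pqMin (x y : Int × Int) : Int × Int :=
  if x.1 < y.1 ∨ (x.1 = y.1 ∧ x.2 ≤ y.2) then x else y

-- the while loop of temporal_reach_from; heapq is ported by its exact contract: heappop removes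
-- and returns the minimum tuple of the pending multiset (equal tuples are identical values, so
-- which copy is removed is unobservable); fuel only makes the loop total (pops ≤ pushes ≤ 2*|edges|+1,
-- since each push strictly lowers best[v] to one of deg(v) incident times)
def reachLoopA (adj : PySem.Dict Int (List (Int × Int))) :
    Nat → PySem.Dict Int Int → List (Int × Int) → PySem.Dict Int Int
  | 0, best, _ => best
  | fuel + 1, best, queue =>
    match queue with
    | [] => best
    | q :: qs =>
      let m := qs.foldl pqMin q
      let rest := (q :: qs).erase m
      if staleGt m.1 (best.get? m.2) then reachLoopA adj fuel best rest
      else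
        -- 'for (v, te) in adj[u]' (the defaultdict read adj[u] only inserts an empty list: no effect)
        let st := (adj.getD m.2 []).foldl (stepA m.1) (best, rest)
        reachLoopA adj fuel st.1 st.2

def temporal_reach_from (source : Int) (adj : PySem.Dict Int (List (Int × Int)))
    (depart : Int) (fuel : Nat) : PySem.Dict Int Int :=
  reachLoopA adj fuel (PySem.Dict.empty.insert source depart) [(depart, source)]

def all_pairs_reachable_set (k : Int) (edges : List (Int × Int × Int)) : List (Int × Int) :=
  let adj := build_adj edges
  let n := 2 * k
  (PySem.List.pyRange 0 n 1).foldl (fun pairs s =>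
    let r := temporal_reach_from s adj (-1) (2 * edges.length + 2)
    r.keys.foldl (fun p d => if d ≠ s then PySem.Set.add p (s, d) else p) pairs)
    PySem.Set.empty

-- ===== PORT B =====
-- bisect.insort on the sorted pending list (insert after equal entries)
def insortB (xs : List (Int × Int)) (e : Int × Int) : List (Int × Int) :=
  match xs with
  | [] => [e]
  | y :: ys => if e.1 < y.1 ∨ (e.1 = y.1 ∧ e.2 < y.2) then e :: y :: ys else y :: insortB ys e

-- body of B's 'for (a, b, te) in edges' relaxation scan
def stepB (u tarr : Int) (p : PySem.Dict Int Int × List (Int × Int)) (e : Int × Int × Int) :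
    PySem.Dict Int Int × List (Int × Int) :=
  let p1 := if e.1 == u && improves tarr e.2.2 (p.1.get? e.2.1) then
      (p.1.insert e.2.1 e.2.2, insortB p.2 (e.2.2, e.2.1)) else p
  if e.2.1 == u && improves tarr e.2.2 (p1.1.get? e.1) then
      (p1.1.insert e.1 e.2.2, insortB p1.2 (e.2.2, e.1)) else p1

-- B's while loop: pending.pop(0) on the sorted list; fuel as in A
def reachLoopB (edges : List (Int × Int × Int)) :
    Nat → PySem.Dict Int Int → List (Int × Int) → PySem.Dict Int Int
  | 0, best, _ => best
  | fuel + 1, best, pending =>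
    match pending with
    | [] => best
    | m :: rest =>
      if staleGt m.1 (best.get? m.2) then reachLoopB edges fuel best rest
      else
        let st := edges.foldl (stepB m.2 m.1) (best, rest)
        reachLoopB edges fuel st.1 st.2

def all_pairs_reachable_set_alt (k : Int) (edges : List (Int × Int × Int)) : List (Int × Int) :=
  (PySem.List.pyRange 0 (2 * k) 1).foldl (fun pairs s =>
    let r := reachLoopB edges (2 * edges.length + 2) (PySem.Dict.empty.insert s (-1)) [((-1 : Int), s)]
    r.keys.foldl (fun p d => if d ≠ s then PySem.Set.add p (s, d) else p) pairs)
    PySem.Set.empty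

-- ===== PRECONDITION & SPEC =====
def Spec_all_pairs_reachable_set (k : Int) (edges : List (Int × Int × Int)) (out : List (Int × Int)) : Prop := out = all_pairs_reachable_set_alt k edges
instance (k : Int) (edges : List (Int × Int × Int)) (out : List (Int × Int)) : Decidable (Spec_all_pairs_reachable_set k edges out) := by unfold Spec_all_pairs_reachable_set; infer_instance

-- ===== CLAIM (what is proved, stated in full; the proofs are below) =====
def Claim_equal_all_pairs_reachable_set : Prop := ∀ (k : Int) (edges : List (Int × Int × Int)), Dom_all_pairs_reachable_set k edges → Spec_all_pairs_reachable_set k edges (all_pairs_reachable_set k edges)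

-- ===== LEMMAS AND PROOFS =====

def lexLe (x y : Int × Int) : Prop := x.1 < y.1 ∨ (x.1 = y.1 ∧ x.2 ≤ y.2)

theorem lexLe_refl (x : Int × Int) : lexLe x x := Or.inr ⟨rfl, le_refl _⟩

theorem lexLe_trans {x y z : Int × Int} (h1 : lexLe x y) (h2 : lexLe y z) : lexLe x z := by
  simp only [lexLe] at *; omega

theorem lexLe_antisymm {x y : Int × Int} (h1 : lexLe x y) (h2 : lexLe y x) : x = y := by
  have : x.1 = y.1 ∧ x.2 = y.2 := by simp only [lexLe] at *; omega
  exact Prod.ext_iff.mpr this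

theorem pqMin_le_left (x y : Int × Int) : lexLe (pqMin x y) x := by
  unfold pqMin; split
  · exact lexLe_refl x
  · rename_i h
    simp only [lexLe] at *; omega

theorem pqMin_le_right (x y : Int × Int) : lexLe (pqMin x y) y := by
  unfold pqMin; split
  · rename_i h; exact h
  · exact lexLe_refl y

theorem pqMin_cases (x y : Int × Int) : pqMin x y = x ∨ pqMin x y = y := by
  unfold pqMin; split <;> simp

theorem foldl_pqMin_mem : ∀ (qs : List (Int × Int)) (q : Int × Int), qs.foldl pqMin q ∈ q :: qs := by
  intro qs
  induction qs with
  | nil => intro q; simp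
  | cons y ys ih =>
    intro q
    simp only [List.foldl_cons]
    have h := ih (pqMin q y)
    rcases List.mem_cons.mp h with h2 | h2
    · rw [h2]
      rcases pqMin_cases q y with h1 | h1 <;> simp [h1]
    · simp [h2]

theorem foldl_pqMin_le_seed : ∀ (qs : List (Int × Int)) (q : Int × Int), lexLe (qs.foldl pqMin q) q := by
  intro qs
  induction qs with
  | nil => intro q; exact lexLe_refl q
  | cons y ys ih =>
    intro q
    exact lexLe_trans (ih (pqMin q y)) (pqMin_le_left q y)

theorem foldl_pqMin_le : ∀ (qs : List (Int × Int)) (q y : Int × Int), y ∈ q :: qs →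
    lexLe (qs.foldl pqMin q) y := by
  intro qs
  induction qs with
  | nil =>
    intro q y hy
    simp only [List.mem_cons, List.not_mem_nil, or_false] at hy
    subst hy; exact lexLe_refl _
  | cons z zs ih =>
    intro q y hy
    rcases List.mem_cons.mp hy with h | h
    · rw [h]
      exact lexLe_trans (foldl_pqMin_le_seed zs (pqMin q z)) (pqMin_le_left q z)
    · rcases List.mem_cons.mp h with h | h
      · rw [h]
        exact lexLe_trans (foldl_pqMin_le_seed zs (pqMin q z)) (pqMin_le_right q z)
      · exact ih (pqMin q z) y (List.mem_cons_of_mem _ h)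

-- the head of a sorted permutation of the queue is exactly the minimum heapq pops
theorem foldl_pqMin_eq_head {q : Int × Int} {qs : List (Int × Int)} {m : Int × Int}
    {rest : List (Int × Int)} (hp : (q :: qs).Perm (m :: rest))
    (hs : List.Pairwise lexLe (m :: rest)) : qs.foldl pqMin q = m := by
  have hmem : qs.foldl pqMin q ∈ m :: rest := hp.subset (foldl_pqMin_mem qs q)
  have hle : lexLe (qs.foldl pqMin q) m :=
    foldl_pqMin_le qs q m (hp.symm.subset (List.mem_cons_self))
  have hge : lexLe m (qs.foldl pqMin q) := by
    rcases List.mem_cons.mp hmem with h | h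
    · rw [h]; exact lexLe_refl m
    · exact (List.pairwise_cons.mp hs).1 _ h
  exact lexLe_antisymm hle hge

theorem insortB_perm : ∀ (xs : List (Int × Int)) (e : Int × Int), (insortB xs e).Perm (e :: xs) := by
  intro xs e
  induction xs with
  | nil => simp [insortB]
  | cons y ys ih =>
    unfold insortB; split
    · exact List.Perm.refl _
    · exact (ih.cons y).trans (List.Perm.swap e y ys)

theorem mem_insortB {xs : List (Int × Int)} {e a : Int × Int} (h : a ∈ insortB xs e) :
    a = e ∨ a ∈ xs := by
  have := (insortB_perm xs e).subset h
  simpa using this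

theorem pairwise_insortB : ∀ {xs : List (Int × Int)} (e : Int × Int),
    List.Pairwise lexLe xs → List.Pairwise lexLe (insortB xs e) := by
  intro xs
  induction xs with
  | nil => intro e _; simp [insortB]
  | cons y ys ih =>
    intro e h
    obtain ⟨hy, hys⟩ := List.pairwise_cons.mp h
    unfold insortB; split
    · rename_i hc
      refine List.pairwise_cons.mpr ⟨?_, h⟩
      intro z hz
      rcases List.mem_cons.mp hz with h1 | h1
      · subst h1
        simp only [lexLe] at hc ⊢; omega
      · have hyz := hy z h1
        have hey : lexLe e y := by simp only [lexLe] at hc ⊢; omega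
        exact lexLe_trans hey hyz
    · rename_i hc
      refine List.pairwise_cons.mpr ⟨?_, ih e hys⟩
      intro z hz
      rcases mem_insortB hz with h1 | h1
      · subst h1
        simp only [lexLe] at hc ⊢; omega
      · exact hy z h1

-- the per-step relaxation list A reads from the adjacency dict, expressed over the raw edge list
def flatRel (u : Int) (edges : List (Int × Int × Int)) : List (Int × Int) :=
  edges.flatMap (fun e =>
    (if e.1 = u then [(e.2.1, e.2.2)] else []) ++ (if e.2.1 = u then [(e.1, e.2.2)] else []))

theorem build_adj_getD (edges : List (Int × Int × Int)) (u : Int) :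
    (build_adj edges).getD u [] = flatRel u edges := by
  suffices h : ∀ d : PySem.Dict Int (List (Int × Int)),
      (edges.foldl (fun d e =>
        (PySem.Dict.modify d e.1 [] (· ++ [(e.2.1, e.2.2)])).modify e.2.1 [] (· ++ [(e.1, e.2.2)])) d).getD u []
      = d.getD u [] ++ flatRel u edges by
    have := h PySem.Dict.empty
    simpa [build_adj, PySem.Dict.getD_empty] using this
  induction edges with
  | nil => intro d; simp [flatRel]
  | cons e es ih =>
    intro d
    simp only [List.foldl_cons]
    rw [ih]
    have hflat : flatRel u (e :: es)
        = ((if e.1 = u then [(e.2.1, e.2.2)] else [])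
            ++ (if e.2.1 = u then [(e.1, e.2.2)] else [])) ++ flatRel u es := by
      simp [flatRel]
    rw [hflat]
    simp only [PySem.Dict.getD_modify]
    by_cases h1 : u = e.1 <;> by_cases h2 : u = e.2.1 <;>
      simp [h1, h2, eq_comm, List.append_assoc] <;>
      by_cases h3 : e.1 = e.2.1 <;> simp [h3]

-- B's edge scan performs exactly the relaxations of the list flatRel, one at a time
def stepB1 (tarr : Int) (p : PySem.Dict Int Int × List (Int × Int)) (vt : Int × Int) :
    PySem.Dict Int Int × List (Int × Int) :=
  if improves tarr vt.2 (p.1.get? vt.1) then (p.1.insert vt.1 vt.2, insortB p.2 (vt.2, vt.1)) else p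

theorem foldl_stepB_eq (u tarr : Int) :
    ∀ (edges : List (Int × Int × Int)) (st : PySem.Dict Int Int × List (Int × Int)),
    edges.foldl (stepB u tarr) st = (flatRel u edges).foldl (stepB1 tarr) st := by
  intro edges
  induction edges with
  | nil => intro st; simp [flatRel]
  | cons e es ih =>
    intro st
    simp only [List.foldl_cons, flatRel, List.flatMap_cons, List.foldl_append]
    rw [ih]
    congr 1
    by_cases h1 : e.1 = u <;> by_cases h2 : e.2.1 = u <;>
      simp [stepB, stepB1, h1, h2]

-- relaxation bisimulation: same best dict, permuted queues, B's queue stays sorted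
theorem relax_bisim (tarr : Int) :
    ∀ (L : List (Int × Int)) (best : PySem.Dict Int Int) (qa qb : List (Int × Int)),
    qa.Perm qb → List.Pairwise lexLe qb →
    (L.foldl (stepA tarr) (best, qa)).1 = (L.foldl (stepB1 tarr) (best, qb)).1 ∧
    (L.foldl (stepA tarr) (best, qa)).2.Perm (L.foldl (stepB1 tarr) (best, qb)).2 ∧
    List.Pairwise lexLe (L.foldl (stepB1 tarr) (best, qb)).2 := by
  intro L
  induction L with
  | nil => intro best qa qb hp hs; exact ⟨rfl, hp, hs⟩
  | cons vt L ih =>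
    intro best qa qb hp hs
    simp only [List.foldl_cons]
    by_cases h : improves tarr vt.2 (best.get? vt.1) = true
    · simp only [stepA, stepB1, h, if_pos]
      refine ih _ _ _ ?_ (pairwise_insortB _ hs)
      exact (List.perm_append_singleton _ _).trans ((hp.cons _).trans (insortB_perm qb _).symm)
    · have h' : improves tarr vt.2 (best.get? vt.1) = false := by
        simpa using h
      simp only [stepA, stepB1, h', Bool.false_eq_true, if_false]
      exact ih best qa qb hp hs

-- main loop bisimulation
theorem loop_bisim (edges : List (Int × Int × Int)) :
    ∀ (fuel : Nat) (best : PySem.Dict Int Int) (qa qb : List (Int × Int)),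
    qa.Perm qb → List.Pairwise lexLe qb →
    reachLoopA (build_adj edges) fuel best qa = reachLoopB edges fuel best qb := by
  intro fuel
  induction fuel with
  | zero => intro best qa qb _ _; rfl
  | succ fuel ih =>
    intro best qa qb hp hs
    cases qb with
    | nil =>
      have hqa : qa = [] := hp.eq_nil
      subst hqa
      simp [reachLoopA, reachLoopB]
    | cons m rest =>
      cases qa with
      | nil => exact absurd hp.symm.eq_nil (by simp)
      | cons q qs =>
        have hmin : qs.foldl pqMin q = m := foldl_pqMin_eq_head hp hs
        have herase : ((q :: qs).erase m).Perm rest := by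
          have := hp.erase m
          simpa [List.erase_cons_head] using this
        obtain ⟨hsm, hsrest⟩ := List.pairwise_cons.mp hs
        simp only [reachLoopA, reachLoopB, hmin]
        by_cases hst : staleGt m.1 (best.get? m.2) = true
        · simp only [hst, if_pos]
          exact ih best _ rest herase hsrest
        · have hst' : staleGt m.1 (best.get? m.2) = false := by simpa using hst
          simp only [hst', Bool.false_eq_true, if_false]
          rw [build_adj_getD, foldl_stepB_eq]
          obtain ⟨h1, h2, h3⟩ := relax_bisim m.1 (flatRel m.2 edges) best _ rest herase hsrest
          rw [h1]
          exact ih _ _ _ h2 h3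

theorem reach_eq (edges : List (Int × Int × Int)) (s : Int) (fuel : Nat) :
    temporal_reach_from s (build_adj edges) (-1) fuel
      = reachLoopB edges fuel (PySem.Dict.empty.insert s (-1)) [((-1 : Int), s)] := by
  unfold temporal_reach_from
  exact loop_bisim edges fuel _ _ _ (List.Perm.refl _) (by simp)

-- ===== VERDICT (by name: the statement is the Claim_ definition above) =====
theorem all_pairs_reachable_set_spec : Claim_equal_all_pairs_reachable_set := by
  intro k edges _
  unfold Spec_all_pairs_reachable_set
  show (PySem.List.pyRange 0 (2 * k) 1).foldl (fun pairs s =>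
      (temporal_reach_from s (build_adj edges) (-1) (2 * edges.length + 2)).keys.foldl
        (fun p d => if d ≠ s then PySem.Set.add p (s, d) else p) pairs) PySem.Set.empty
    = all_pairs_reachable_set_alt k edges
  unfold all_pairs_reachable_set_alt
  refine PySem.List.foldl_congr_mem _ _ _ _ ?_
  intro acc s _
  rw [reach_eq]
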